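-- pv_equiv track=rewrite | github.com/d1zm4as/CodeWars | Python/7 Kyu/replaces_every_nth.py | replace_nth
-- ===== SOURCE A (Python) =====
-- def replace_nth(text, n, old, new):
--     copy = ""
--     cont = 0
--     for x in text:
--         if x == old:
--             cont+=1
--             if cont==n:
--                 copy+=new
--                 cont = 0
--                 continue
--         copy+=x
--
--     return copy
-- ===== SOURCE B (Python) =====
-- def replace_nth(text, n, old, new):
--     # Two-pass: first find the indices to replace, then render the output.
--     if n <= 0:
--         return text
--     count = 0
--     targets = set()
--     for i, x in enumerate(text):
--         if x == old:
--             count += 1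
--             if count % n == 0:
--                 targets.add(i)
--     return ''.join(new if i in targets else x for i, x in enumerate(text))
-- ===== Notes on version B (the rewrite author's own statement) =====
-- stated objective: alternative
-- what changed: Replaces the single pass with a self-resetting counter and incremental string building by two passes: one enumerate pass collecting into a set the indices whose running occurrence count is a multiple of n, then a ''.join render pass; n <= 0 short-circuits to the unchanged text.
import Mathlib
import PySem

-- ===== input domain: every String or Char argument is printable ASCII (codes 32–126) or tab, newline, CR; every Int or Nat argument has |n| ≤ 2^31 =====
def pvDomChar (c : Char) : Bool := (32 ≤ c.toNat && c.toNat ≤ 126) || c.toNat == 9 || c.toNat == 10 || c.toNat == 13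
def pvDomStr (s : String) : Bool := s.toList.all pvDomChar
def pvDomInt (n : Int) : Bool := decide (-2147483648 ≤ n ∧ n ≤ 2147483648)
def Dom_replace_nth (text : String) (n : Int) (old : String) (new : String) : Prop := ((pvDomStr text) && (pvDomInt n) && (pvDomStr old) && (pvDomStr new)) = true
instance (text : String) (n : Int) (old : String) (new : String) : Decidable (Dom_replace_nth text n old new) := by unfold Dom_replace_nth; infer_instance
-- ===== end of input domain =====

-- B replaces A's single self-resetting-counter pass by a two-pass decomposition (collect replacement indices into a set, then render with a join); same result, similar cost.


-- ===== PORT A =====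
-- one loop step of A: 'if x == old: cont+=1; if cont==n: copy+=new; cont=0; continue' / 'copy+=x'
-- (Python's x == old compares the one-char string of x with old, exact as [x] = old.toList)
def repAStep (n : Int) (old new : String) (p : List Char × Int) (x : Char) : List Char × Int :=
  if [x] = old.toList then
    let cont := p.2 + 1
    if cont = n then (p.1 ++ new.toList, 0)
    else (p.1 ++ [x], cont)
  else (p.1 ++ [x], p.2)

def replace_nth (text : String) (n : Int) (old : String) (new : String) : String :=
  String.ofList (text.toList.foldl (repAStep n old new) ([], 0)).1

-- ===== PORT B =====
-- pass 1 step of B: 'if x == old: count += 1; if count % n == 0: targets.add(i)'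
def collectStep (n : Int) (old : String) (p : Int × PySem.Set Int) (ix : Int × Char) : Int × PySem.Set Int :=
  if [ix.2] = old.toList then
    let c := p.1 + 1
    if PySem.Int.mod c n = 0 then (c, PySem.Set.add p.2 ix.1) else (c, p.2)
  else p

def replace_nth_alt (text : String) (n : Int) (old : String) (new : String) : String :=
  if n ≤ 0 then text
  else
    let pairs := PySem.List.enumerate text.toList 0
    let targets := (pairs.foldl (collectStep n old) (0, PySem.Set.empty)).2
    String.ofList (pairs.flatMap (fun ix => if PySem.Set.contains targets ix.1 then new.toList else [ix.2]))

-- ===== PRECONDITION & SPEC =====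
def Spec_replace_nth (text : String) (n : Int) (old : String) (new : String) (out : String) : Prop := out = replace_nth_alt text n old new
instance (text : String) (n : Int) (old : String) (new : String) (out : String) : Decidable (Spec_replace_nth text n old new out) := by unfold Spec_replace_nth; infer_instance

-- ===== CLAIM (what is proved, stated in full; the proofs are below) =====
def Claim_equal_replace_nth : Prop := ∀ (text : String) (n : Int) (old : String) (new : String), Dom_replace_nth text n old new → Spec_replace_nth text n old new (replace_nth text n old new)

-- ===== LEMMAS AND PROOFS =====

-- with n ≤ 0 the inner 'cont == n' of A never fires (cont ≥ 1 there), so A copies text unchanged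
lemma foldA_nonpos (n : Int) (old new : String) (hn : n ≤ 0) :
    ∀ (l : List Char) (acc : List Char) (c : Int), 0 ≤ c →
      (l.foldl (repAStep n old new) (acc, c)).1 = acc ++ l := by
  intro l
  induction l with
  | nil => intro acc c _; simp
  | cons x xs ih =>
    intro acc c hc
    simp only [List.foldl_cons, repAStep]
    split_ifs with hm he
    · omega
    · rw [ih (acc ++ [x]) (c + 1) (by omega)]; simp
    · rw [ih (acc ++ [x]) c hc]; simp

-- every index added during the collect fold over 'enumerate l j' is ≥ j (or was already in s)
lemma collect_mem (n : Int) (old : String) :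
    ∀ (l : List Char) (j c : Int) (s : PySem.Set Int) (y : Int),
      y ∈ ((PySem.List.enumerate l j).foldl (collectStep n old) (c, s)).2 →
      y ∈ s ∨ j ≤ y := by
  intro l
  induction l with
  | nil => intro j c s y h; simp [PySem.List.enumerate_nil] at h; exact Or.inl h
  | cons x xs ih =>
    intro j c s y h
    rw [PySem.List.enumerate_cons, List.foldl_cons] at h
    simp only [collectStep] at h
    split_ifs at h with hm he
    · rcases ih (j + 1) (c + 1) (PySem.Set.add s j) y h with h' | h'
      · rcases (PySem.Set.mem_add s j y).mp h' with h'' | h''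
        · exact Or.inl h''
        · exact Or.inr (by omega)
      · exact Or.inr (by omega)
    · rcases ih (j + 1) (c + 1) s y h with h' | h'
      · exact Or.inl h'
      · exact Or.inr (by omega)
    · rcases ih (j + 1) c s y h with h' | h'
      · exact Or.inl h'
      · exact Or.inr (by omega)

-- the collect fold only grows the set
lemma collect_subset (n : Int) (old : String) :
    ∀ (l : List (Int × Char)) (c : Int) (s : PySem.Set Int) (y : Int),
      y ∈ s → y ∈ (l.foldl (collectStep n old) (c, s)).2 := by
  intro l
  induction l with
  | nil => intro c s y h; exact h
  | cons p ps ih =>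
    intro c s y h
    simp only [List.foldl_cons, collectStep]
    split_ifs with hm he
    · exact ih _ _ y ((PySem.Set.mem_add s p.1 y).mpr (Or.inl h))
    · exact ih _ _ y h
    · exact ih _ _ y h

lemma mod_step_zero (c n : Int) (hn : 0 < n) (h : PySem.Int.mod c n + 1 = n) :
    PySem.Int.mod (c + 1) n = 0 := by
  simp only [PySem.Int.mod_eq_emod_of_pos hn] at h ⊢
  have hd := Int.ediv_add_emod c n
  have h2 : c + 1 = n * (c / n + 1) := by linarith
  rw [h2]; exact Int.mul_emod_right _ _

lemma mod_step_succ (c n : Int) (hn : 0 < n) (h : PySem.Int.mod c n + 1 ≠ n) :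
    PySem.Int.mod (c + 1) n = PySem.Int.mod c n + 1 := by
  have hnn := PySem.Int.mod_nonneg c hn
  have hlt := PySem.Int.mod_lt c hn
  simp only [PySem.Int.mod_eq_emod_of_pos hn] at h hnn hlt ⊢
  have hd := Int.ediv_add_emod c n
  have h2 : c + 1 = c % n + 1 + n * (c / n) := by linarith
  rw [h2, Int.add_mul_emod_self_left]
  exact Int.emod_eq_of_lt (by omega) (by omega)

-- main invariant: A's fold (with counter = c mod n) produces exactly B's rendering of the
-- remaining characters against the final target set, provided everything already in s is left of i0
lemma main_inv (n : Int) (old new : String) (hn : 1 ≤ n) :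
    ∀ (l : List Char) (i0 c : Int) (acc : List Char) (s : PySem.Set Int),
      0 ≤ c → (∀ j ∈ s, j < i0) →
      (l.foldl (repAStep n old new) (acc, PySem.Int.mod c n)).1
        = acc ++ (PySem.List.enumerate l i0).flatMap
            (fun ix => if PySem.Set.contains
                (((PySem.List.enumerate l i0).foldl (collectStep n old) (c, s)).2) ix.1
              then new.toList else [ix.2]) := by
  intro l
  induction l with
  | nil => intro i0 c acc s _ _; simp [PySem.List.enumerate_nil]
  | cons x xs ih =>
    intro i0 c acc s hc hs
    have hn' : (0 : Int) < n := by omega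
    rw [PySem.List.enumerate_cons]
    simp only [List.foldl_cons, List.flatMap_cons]
    by_cases hm : [x] = old.toList
    · by_cases he : PySem.Int.mod c n + 1 = n
      · -- this occurrence is replaced
        have hz : PySem.Int.mod (c + 1) n = 0 := mod_step_zero c n hn' he
        have hstep : collectStep n old (c, s) (i0, x) = (c + 1, PySem.Set.add s i0) := by
          simp [collectStep, hm, hz]
        have hA : repAStep n old new (acc, PySem.Int.mod c n) x = (acc ++ new.toList, 0) := by
          simp [repAStep, hm, he]
        have hs' : ∀ j ∈ PySem.Set.add s i0, j < i0 + 1 := by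
          intro j hj
          rcases (PySem.Set.mem_add s i0 j).mp hj with h' | h'
          · exact lt_trans (hs j h') (by omega)
          · omega
        have hin : i0 ∈ ((PySem.List.enumerate xs (i0 + 1)).foldl (collectStep n old)
            (c + 1, PySem.Set.add s i0)).2 :=
          collect_subset n old _ _ _ i0 ((PySem.Set.mem_add s i0 i0).mpr (Or.inr rfl))
        rw [hA]
        simp only [hstep]
        have hrec := ih (i0 + 1) (c + 1) (acc ++ new.toList) (PySem.Set.add s i0) (by omega) hs'
        rw [hz] at hrec
        rw [hrec]
        simp [PySem.Set.contains, hin]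
      · -- occurrence counted but not replaced
        have hsucc : PySem.Int.mod (c + 1) n = PySem.Int.mod c n + 1 := mod_step_succ c n hn' he
        have hnz : ¬ PySem.Int.mod (c + 1) n = 0 := by
          have := PySem.Int.mod_nonneg c hn'; omega
        have hstep : collectStep n old (c, s) (i0, x) = (c + 1, s) := by
          simp [collectStep, hm, hnz]
        have hA : repAStep n old new (acc, PySem.Int.mod c n) x
            = (acc ++ [x], PySem.Int.mod c n + 1) := by
          simp [repAStep, hm, he]
        have hs' : ∀ j ∈ s, j < i0 + 1 := fun j hj => lt_trans (hs j hj) (by omega)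
        have hout : i0 ∉ ((PySem.List.enumerate xs (i0 + 1)).foldl (collectStep n old)
            (c + 1, s)).2 := by
          intro hmem
          rcases collect_mem n old xs (i0 + 1) (c + 1) s i0 hmem with h' | h'
          · exact absurd (hs i0 h') (by omega)
          · omega
        rw [hA]
        simp only [hstep]
        have hrec := ih (i0 + 1) (c + 1) (acc ++ [x]) s (by omega) hs'
        rw [hsucc] at hrec
        rw [hrec]
        simp [PySem.Set.contains, hout]
    · -- not an occurrence
      have hstep : collectStep n old (c, s) (i0, x) = (c, s) := by
        simp [collectStep, hm]
      have hA : repAStep n old new (acc, PySem.Int.mod c n) x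
          = (acc ++ [x], PySem.Int.mod c n) := by
        simp [repAStep, hm]
      have hs' : ∀ j ∈ s, j < i0 + 1 := fun j hj => lt_trans (hs j hj) (by omega)
      have hout : i0 ∉ ((PySem.List.enumerate xs (i0 + 1)).foldl (collectStep n old)
          (c, s)).2 := by
        intro hmem
        rcases collect_mem n old xs (i0 + 1) c s i0 hmem with h' | h'
        · exact absurd (hs i0 h') (by omega)
        · omega
      rw [hA]
      simp only [hstep]
      rw [ih (i0 + 1) c (acc ++ [x]) s hc hs']
      simp [PySem.Set.contains, hout]

-- ===== VERDICT (by name: the statement is the Claim_ definition above) =====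
theorem replace_nth_spec : Claim_equal_replace_nth := by
  intro text n old new _
  unfold Spec_replace_nth replace_nth replace_nth_alt
  by_cases hn : n ≤ 0
  · rw [if_pos hn, foldA_nonpos n old new hn text.toList [] 0 le_rfl]
    simp [String.ofList_toList]
  · rw [if_neg hn]
    have hm0 : PySem.Int.mod 0 n = 0 := by
      simp only [PySem.Int.mod_eq_emod_of_pos (show (0 : Int) < n by omega)]
      simp
    have hmain := main_inv n old new (by omega) text.toList 0 0 [] PySem.Set.empty le_rfl
      (by intro j hj; simp [PySem.Set.empty] at hj)
    rw [hm0] at hmain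
    rw [hmain]
    simp
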